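-- pv_equiv track=rewrite | github.com/nabingautam2000/python-basic | start_task_grid.py | find_special_cells
-- ===== SOURCE A (Python) =====
-- def find_special_cells(grid):
--   """
--   This function finds the coordinates of the 'S' (start) and all 'T' (task)
--   cells in a given grid.
--
--   Args:
--     grid: A list of strings representing the grid.
--
--   Returns:
--     A tuple containing the start coordinates (row, col) and a list of
--     task coordinates [(row1, col1), (row2, col2), ...].
--     Returns (None, []) if 'S' is not found.
--   """
--   start_coords = None
--   task_coords = []
--
--   # Enumerate through the grid to get both index (row number) and value (row content)
--   for r_idx, row in enumerate(grid):
--     # Enumerate through the row string to get index (column number) and character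
--     for c_idx, char in enumerate(row):
--       if char == 'S':
--         start_coords = (r_idx, c_idx)
--       elif char == 'T':
--         task_coords.append((r_idx, c_idx))
--
--   return start_coords, task_coords
-- ===== SOURCE B (Python) =====
-- def find_special_cells(grid):
--     """Locate the start cell 'S' and every task cell 'T' in the grid."""
--     s_cells = [(r, c) for r, row in enumerate(grid)
--                for c, ch in enumerate(row) if ch == 'S']
--     task_coords = [(r, c) for r, row in enumerate(grid)
--                    for c, ch in enumerate(row) if ch == 'T']
--     return (s_cells[-1] if s_cells else None), task_coords
-- ===== Notes on version B (the rewrite author's own statement) =====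
-- stated objective: simpler
-- what changed: A's single nested loop that mutates two accumulators (with last-write-wins overwriting for the start) is replaced by a declarative form: collect all 'S' cells and all 'T' cells with flat comprehensions and take the final 'S' cell (or None) as the start.
import Mathlib
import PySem

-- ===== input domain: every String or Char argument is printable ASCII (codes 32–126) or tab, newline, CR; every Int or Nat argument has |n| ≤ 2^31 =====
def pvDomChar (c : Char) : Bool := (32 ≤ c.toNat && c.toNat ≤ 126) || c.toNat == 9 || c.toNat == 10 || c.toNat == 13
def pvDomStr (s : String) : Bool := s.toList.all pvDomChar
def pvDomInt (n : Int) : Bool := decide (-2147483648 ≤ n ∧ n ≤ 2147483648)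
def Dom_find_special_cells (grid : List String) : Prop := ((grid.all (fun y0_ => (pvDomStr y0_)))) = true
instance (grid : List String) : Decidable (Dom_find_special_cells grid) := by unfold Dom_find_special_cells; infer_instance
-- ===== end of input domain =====

-- B replaces A's single nested loop that mutates two accumulators by a
-- declarative form: collect all 'S' cells and all 'T' cells with flat
-- comprehensions and take the final 'S' cell (or none) as the start
-- (objective: simpler).

-- ===== PORT A =====
-- inner loop body of A ('for c_idx, char in enumerate(row)')
def stepA (r : Int) (st2 : (Option (Int × Int)) × (List (Int × Int))) (cch : Int × Char) :
    (Option (Int × Int)) × (List (Int × Int)) :=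
  if cch.2 = 'S' then (some (r, cch.1), st2.2)
  else if cch.2 = 'T' then (st2.1, st2.2 ++ [(r, cch.1)])
  else st2

def find_special_cells (grid : List String) : (Option (Int × Int)) × (List (Int × Int)) :=
  (PySem.List.enumerate grid).foldl
    (fun st rrow => (PySem.List.enumerate rrow.2.toList).foldl (stepA rrow.1) st)
    ((none : Option (Int × Int)), ([] : List (Int × Int)))

-- ===== PORT B =====
-- one row's contribution to B's comprehension collecting the ch-cells
def rowCells (ch : Char) (r : Int) (cs : List Char) : List (Int × Int) :=
  (PySem.List.enumerate cs).filterMap (fun cch => if cch.2 = ch then some (r, cch.1) else none)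

def find_special_cells_alt (grid : List String) : (Option (Int × Int)) × (List (Int × Int)) :=
  let s_cells := (PySem.List.enumerate grid).flatMap (fun rrow => rowCells 'S' rrow.1 rrow.2.toList)
  let task_coords := (PySem.List.enumerate grid).flatMap (fun rrow => rowCells 'T' rrow.1 rrow.2.toList)
  -- 's_cells[-1] if s_cells else None': xs[-1] on a nonempty list is its last element
  ((if s_cells = [] then none else s_cells.getLast?), task_coords)

-- ===== PRECONDITION & SPEC =====
def Spec_find_special_cells (grid : List String) (out : (Option (Int × Int)) × (List (Int × Int))) : Prop := out = find_special_cells_alt grid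
instance (grid : List String) (out : (Option (Int × Int)) × (List (Int × Int))) : Decidable (Spec_find_special_cells grid out) := by unfold Spec_find_special_cells; infer_instance

-- ===== CLAIM =====
def Claim_equal_find_special_cells : Prop := ∀ (grid : List String), Dom_find_special_cells grid → Spec_find_special_cells grid (find_special_cells grid)

-- ===== LEMMAS AND PROOFS =====

theorem rowCells_append (ch : Char) (r : Int) (cs : List Char) (c : Char) :
    rowCells ch r (cs ++ [c])
      = rowCells ch r cs ++ (if c = ch then [(r, (cs.length : Int))] else []) := by
  simp only [rowCells, PySem.List.enumerate_append, List.filterMap_append]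
  congr 1
  simp only [PySem.List.enumerate_cons, PySem.List.enumerate_nil, List.filterMap_cons,
    List.filterMap_nil]
  split_ifs <;> simp

theorem inner_eq (r : Int) (cs : List Char) (st : (Option (Int × Int)) × (List (Int × Int))) :
    (PySem.List.enumerate cs).foldl (stepA r) st
      = ((rowCells 'S' r cs).getLast?.or st.1, st.2 ++ rowCells 'T' r cs) := by
  induction cs using List.reverseRecOn generalizing st with
  | nil => simp [rowCells, PySem.List.enumerate_nil]
  | append_singleton cs c ih =>
    rw [PySem.List.enumerate_append, List.foldl_append, ih,
      rowCells_append, rowCells_append]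
    simp only [PySem.List.enumerate_cons, PySem.List.enumerate_nil, List.foldl_cons,
      List.foldl_nil, stepA]
    by_cases hS : c = 'S'
    · simp [hS]
    · by_cases hT : c = 'T'
      · simp [hT, List.append_assoc]
      · simp [hS, hT]

theorem outer_eq (rows : List String) (st : (Option (Int × Int)) × (List (Int × Int))) :
    (PySem.List.enumerate rows).foldl
        (fun st rrow => (PySem.List.enumerate rrow.2.toList).foldl (stepA rrow.1) st) st
      = (((PySem.List.enumerate rows).flatMap (fun rrow => rowCells 'S' rrow.1 rrow.2.toList)).getLast?.or st.1,
         st.2 ++ (PySem.List.enumerate rows).flatMap (fun rrow => rowCells 'T' rrow.1 rrow.2.toList)) := by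
  induction rows using List.reverseRecOn generalizing st with
  | nil => simp [PySem.List.enumerate_nil]
  | append_singleton rows row ih =>
    rw [PySem.List.enumerate_append, List.foldl_append, ih]
    simp only [PySem.List.enumerate_cons, PySem.List.enumerate_nil, List.foldl_cons,
      List.foldl_nil, List.flatMap_append, List.flatMap_cons, List.flatMap_nil]
    rw [inner_eq]
    refine Prod.ext ?_ ?_
    · simp only [List.getLast?_append]
      cases (rowCells 'S' (0 + (rows.length : Int)) row.toList).getLast? <;> simp
    · simp [List.append_assoc]

-- ===== VERDICT =====
theorem find_special_cells_spec : Claim_equal_find_special_cells := by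
  intro grid _
  unfold Spec_find_special_cells find_special_cells find_special_cells_alt
  rw [outer_eq]
  refine Prod.ext ?_ (by simp)
  show ((PySem.List.enumerate grid).flatMap (fun rrow => rowCells 'S' rrow.1 rrow.2.toList)).getLast?.or none = _
  cases (PySem.List.enumerate grid).flatMap (fun rrow => rowCells 'S' rrow.1 rrow.2.toList) <;>
    simp
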